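-- pv_equiv track=rewrite | github.com/verixiaapps/verixiaapps.github.io | scripts/gsc_refresh_isolated.py | build_internal_link_targets
-- ===== SOURCE A (Python) =====
-- from typing import Dict, List, Optional, Set
--
-- TODAY_TARGET_SLUGS = [
--     "is-amazon-refund-message-legit-or-scam",
--     "is-google-account-disabled-email-legit-or-scam",
--     "is-fedex-customs-charge-email-legit-or-scam",
--     "is-venmo-verification-code-text-real-or-fake",
--     "is-bank-debit-card-suspension-email-legit-or-scam",
--     "is-whatsapp-unusual-login-email-legit-or-scam",
--     "is-telegram-suspicious-activity-message-legit-or-scam",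
--     "is-usps-tracking-text-legit-or-scam",
--     "is-venmo-security-alert-email-legit-or-scam",
--     "is-bank-account-closure-email-legit-or-scam",
--     "is-apple-account-verification-email-legit-or-scam",
--     "snapchat-scams",
--     "is-fedex-delivery-legit-or-scam",
--     "is-security-alert-message-legit-or-scam",
-- ]
--
-- STRIP_WORDS = {
--     "is",
--     "this",
--     "a",
--     "an",
--     "the",
--     "or",
--     "and",
--     "legit",
--     "scam",
--     "real",
--     "fake",
-- }
--
-- def build_internal_link_targets(slug: str) -> List[str]:
--     category_keywords = [part for part in slug.split("-") if part and part not in STRIP_WORDS]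
--     preferred: List[str] = []
--     fallback: List[str] = []
--
--     for candidate in TODAY_TARGET_SLUGS:
--         if candidate == slug:
--             continue
--         if any(keyword in candidate for keyword in category_keywords[:3]):
--             preferred.append(candidate)
--         else:
--             fallback.append(candidate)
--
--     return (preferred + fallback)[:10]
-- ===== SOURCE B (Python) =====
-- from typing import List
--
-- TODAY_TARGET_SLUGS = [
--     "is-amazon-refund-message-legit-or-scam",
--     "is-google-account-disabled-email-legit-or-scam",
--     "is-fedex-customs-charge-email-legit-or-scam",
--     "is-venmo-verification-code-text-real-or-fake",
--     "is-bank-debit-card-suspension-email-legit-or-scam",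
--     "is-whatsapp-unusual-login-email-legit-or-scam",
--     "is-telegram-suspicious-activity-message-legit-or-scam",
--     "is-usps-tracking-text-legit-or-scam",
--     "is-venmo-security-alert-email-legit-or-scam",
--     "is-bank-account-closure-email-legit-or-scam",
--     "is-apple-account-verification-email-legit-or-scam",
--     "snapchat-scams",
--     "is-fedex-delivery-legit-or-scam",
--     "is-security-alert-message-legit-or-scam",
-- ]
--
-- STRIP_WORDS = {
--     "is", "this", "a", "an", "the", "or", "and",
--     "legit", "scam", "real", "fake",
-- }
--
-- def build_internal_link_targets(slug: str) -> List[str]: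
--     keywords = [p for p in slug.split("-") if p and p not in STRIP_WORDS][:3]
--     candidates = [c for c in TODAY_TARGET_SLUGS if c != slug]
--     return sorted(candidates,
--                   key=lambda c: 0 if any(k in c for k in keywords) else 1)[:10]
-- ===== Notes on version B (the rewrite author's own statement) =====
-- stated objective: simpler
-- what changed: Replaces the explicit two-bucket preferred/fallback accumulation loop by filtering out the slug itself and then a single stable sort keyed 0/1 on keyword overlap, taking the first 10.
import Mathlib
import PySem

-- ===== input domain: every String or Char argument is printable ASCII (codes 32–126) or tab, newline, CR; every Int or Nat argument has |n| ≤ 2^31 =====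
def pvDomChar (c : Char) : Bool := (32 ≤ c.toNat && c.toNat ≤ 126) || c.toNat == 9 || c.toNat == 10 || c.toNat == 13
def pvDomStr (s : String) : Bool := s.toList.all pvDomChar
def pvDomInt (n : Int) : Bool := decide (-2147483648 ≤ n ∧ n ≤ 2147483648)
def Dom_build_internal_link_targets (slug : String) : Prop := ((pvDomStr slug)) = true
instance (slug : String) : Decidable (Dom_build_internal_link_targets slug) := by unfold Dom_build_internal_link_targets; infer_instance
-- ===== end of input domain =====

-- B replaces A's two-bucket accumulation loop with a filter plus one stable 0/1-keyed sort (objective: simpler); same return value.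

def TODAY_TARGET_SLUGS : List String := [
  "is-amazon-refund-message-legit-or-scam",
  "is-google-account-disabled-email-legit-or-scam",
  "is-fedex-customs-charge-email-legit-or-scam",
  "is-venmo-verification-code-text-real-or-fake",
  "is-bank-debit-card-suspension-email-legit-or-scam",
  "is-whatsapp-unusual-login-email-legit-or-scam",
  "is-telegram-suspicious-activity-message-legit-or-scam",
  "is-usps-tracking-text-legit-or-scam",
  "is-venmo-security-alert-email-legit-or-scam",
  "is-bank-account-closure-email-legit-or-scam",
  "is-apple-account-verification-email-legit-or-scam",
  "snapchat-scams",
  "is-fedex-delivery-legit-or-scam",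
  "is-security-alert-message-legit-or-scam"]

def STRIP_WORDS : PySem.Set String :=
  PySem.Set.ofList ["is", "this", "a", "an", "the", "or", "and", "legit", "scam", "real", "fake"]

-- ===== PORT A =====
def build_internal_link_targets (slug : String) : List String :=
  -- slug.split("-") with a nonempty separator never raises; split? is some here
  let category_keywords : List String :=
    ((PySem.Str.split? slug "-").getD []).filter
      (fun part => part ≠ "" && !(STRIP_WORDS.contains part))
  let pf : List String × List String :=
    TODAY_TARGET_SLUGS.foldl
      (fun acc candidate =>
        if candidate = slug then acc
        else if (PySem.List.slice category_keywords none (some 3)).any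
                  (fun keyword => PySem.Str.isIn keyword candidate) then
          (acc.1 ++ [candidate], acc.2)
        else
          (acc.1, acc.2 ++ [candidate]))
      ([], [])
  PySem.List.slice (pf.1 ++ pf.2) none (some 10)

-- ===== PORT B =====
def build_internal_link_targets_alt (slug : String) : List String :=
  let keywords : List String :=
    PySem.List.slice
      (((PySem.Str.split? slug "-").getD []).filter
        (fun p => p ≠ "" && !(STRIP_WORDS.contains p)))
      none (some 3)
  let candidates : List String := TODAY_TARGET_SLUGS.filter (fun c => c ≠ slug)
  PySem.List.slice
    (PySem.List.sorted candidates
      (fun c => if keywords.any (fun k => PySem.Str.isIn k c) then (0 : Int) else 1))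
    none (some 10)

-- ===== PRECONDITION & SPEC =====
def Spec_build_internal_link_targets (slug : String) (out : List String) : Prop := out = build_internal_link_targets_alt slug
instance (slug : String) (out : List String) : Decidable (Spec_build_internal_link_targets slug out) := by unfold Spec_build_internal_link_targets; infer_instance

-- ===== CLAIM (what is proved, stated in full; the proofs are below) =====
def Claim_equal_build_internal_link_targets : Prop := ∀ (slug : String), Dom_build_internal_link_targets slug → Spec_build_internal_link_targets slug (build_internal_link_targets slug)

-- ===== LEMMAS AND PROOFS =====

-- inserting x before exactly the tail block: all of ys refuse, all of zs accept
theorem insertBy_append_boundary {α : Type} (before : α → α → Bool) (x : α)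
    (ys zs : List α) (h1 : ∀ y ∈ ys, before x y = false) (h2 : ∀ z ∈ zs, before x z = true) :
    PySem.List.insertBy before x (ys ++ zs) = ys ++ x :: zs := by
  induction ys with
  | nil =>
    cases zs with
    | nil => rfl
    | cons z zs' =>
      simp [PySem.List.insertBy, h2 z (by simp)]
  | cons y ys' ih =>
    have hy : before x y = false := h1 y (by simp)
    simp only [List.cons_append, PySem.List.insertBy, hy]
    simp only [Bool.false_eq_true, if_false]
    rw [ih (fun y hy => h1 y (by simp [hy]))]

-- stable sort by a 0/1 key is the hit block followed by the miss block
theorem sorted_binary_key {α : Type} (p : α → Bool) (cs : List α) :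
    PySem.List.sorted cs (fun c => if p c then (0 : Int) else 1) =
      cs.filter p ++ cs.filter (fun c => !p c) := by
  rw [PySem.List.sorted_eq_foldl_insertBy]
  suffices h : ∀ (cs : List α) (F0 F1 : List α),
      (∀ y ∈ F0, p y = true) → (∀ z ∈ F1, p z = false) →
      cs.foldl (fun acc x =>
        PySem.List.insertBy
          (fun a b => decide ((if p a then (0:Int) else 1) < if p b then (0:Int) else 1)) x acc)
        (F0 ++ F1) = (F0 ++ cs.filter p) ++ (F1 ++ cs.filter (fun c => !p c)) by
    simpa using h cs [] [] (by simp) (by simp)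
  intro cs
  induction cs with
  | nil => intro F0 F1 _ _; simp
  | cons c cs' ih =>
    intro F0 F1 hF0 hF1
    simp only [List.foldl_cons]
    by_cases hc : p c = true
    · rw [insertBy_append_boundary _ _ F0 F1
        (by intro y hy; simp [hF0 y hy, hc]) (by intro z hz; simp [hF1 z hz, hc])]
      have := ih (F0 ++ [c]) F1
        (by intro y hy; rcases List.mem_append.1 hy with h | h
            · exact hF0 y h
            · simp at h; subst h; exact hc) hF1
      simpa [hc, List.filter_cons, List.append_assoc] using this
    · have hc' : p c = false := by simpa using hc
      rw [PySem.List.insertBy_of_forall_not_before _ _ _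
        (by intro y hy; rcases List.mem_append.1 hy with h | h
            · simp [hF0 y h, hc']
            · simp [hF1 y h, hc'])]
      have := ih F0 (F1 ++ [c]) hF0
        (by intro z hz; rcases List.mem_append.1 hz with h | h
            · exact hF1 z h
            · simp at h; subst h; exact hc')
      simpa [hc', List.filter_cons, List.append_assoc] using this

-- A's accumulator loop is two filters of the slug-free candidates
theorem foldl_buckets (slug : String) (p : String → Bool) (cs : List String)
    (pref fall : List String) :
    cs.foldl (fun acc candidate =>
        if candidate = slug then acc
        else if p candidate then (acc.1 ++ [candidate], acc.2)
        else (acc.1, acc.2 ++ [candidate])) (pref, fall) =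
      (pref ++ (cs.filter (fun c => c ≠ slug)).filter p,
       fall ++ (cs.filter (fun c => c ≠ slug)).filter (fun c => !p c)) := by
  induction cs generalizing pref fall with
  | nil => simp
  | cons c cs' ih =>
    by_cases h : c = slug
    · simp [h, ih]
    · by_cases hp : p c = true
      · simp [h, hp, ih]
      · have hp' : p c = false := by simpa using hp
        simp [h, hp', ih]

-- ===== VERDICT (by name: the statement is the Claim_ definition above) =====
theorem build_internal_link_targets_spec : Claim_equal_build_internal_link_targets := by
  intro slug _
  unfold Spec_build_internal_link_targets build_internal_link_targets build_internal_link_targets_alt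
  simp only []
  rw [foldl_buckets slug
    (fun candidate =>
      (PySem.List.slice
        (((PySem.Str.split? slug "-").getD []).filter
          (fun part => part ≠ "" && !(STRIP_WORDS.contains part))) none (some 3)).any
        (fun keyword => PySem.Str.isIn keyword candidate))]
  rw [sorted_binary_key]
  simp
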